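-- pv_equiv track=rewrite | github.com/boli66/100DaysOfCodePython | libs/l.py | numWithSpaces
-- ===== SOURCE A (Python) =====
-- def numWithSpaces(num: int) -> str:
--     num = str(num)
--     out = []
--     space = 0
--     for i in range(len(num)):
--         if (space == 3):
--             out.append(" ")
--             space = 0
--         else:
--             space+=1
--         out.append(num[i])
--     return "".join(out).strip()
-- ===== SOURCE B (Python) =====
-- def numWithSpaces(num: int) -> str:
--     s = str(num)
--     head, tail = s[:3], s[3:]
--     chunks = [tail[i:i+4] for i in range(0, len(tail), 4)]
--     return " ".join([head] + chunks)
-- ===== Notes on version B (the rewrite author's own statement) =====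
-- stated objective: simpler
-- what changed: Replaces the character-by-character loop with a space counter by direct slicing: take the first 3 characters, chunk the rest in fixed groups of 4, and join with spaces.
import Mathlib
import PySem

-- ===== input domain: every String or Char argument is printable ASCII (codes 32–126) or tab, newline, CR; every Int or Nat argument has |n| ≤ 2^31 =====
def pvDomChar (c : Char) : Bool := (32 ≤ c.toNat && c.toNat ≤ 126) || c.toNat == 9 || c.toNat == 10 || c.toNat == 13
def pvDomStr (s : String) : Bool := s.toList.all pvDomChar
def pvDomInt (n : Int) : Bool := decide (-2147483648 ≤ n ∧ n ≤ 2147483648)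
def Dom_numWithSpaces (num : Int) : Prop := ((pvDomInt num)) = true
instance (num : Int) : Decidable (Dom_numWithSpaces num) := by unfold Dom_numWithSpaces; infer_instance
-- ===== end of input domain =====

-- B groups str(num) by direct slicing (first 3 chars, then fixed 4-char chunks, joined by " ")
-- instead of A's per-character loop with a space counter: simpler, same output.

-- ===== PORT A =====
-- literal port: num = str(num); out/space loop over range(len(num)); "".join(out).strip()
def numWithSpaces (num : Int) : String :=
  let s : List Char := PySem.Int.toChars num
  let r := (PySem.List.pyRange 0 (PySem.List.len s) 1).foldl
    (fun (acc : List Char × Int) i =>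
      let acc' := if acc.2 == 3 then (acc.1 ++ [' '], 0) else (acc.1, acc.2 + 1)
      (acc'.1 ++ [PySem.List.pyGetD s i ' '], acc'.2))
    ([], 0)
  -- "".join(out).strip() : join of single chars is the char list; .strip() is Chars.strip (exact bridge toList_strip)
  String.mk (PySem.Chars.strip r.1)

-- ===== PORT B =====
def numWithSpaces_alt (num : Int) : String :=
  let s : List Char := PySem.Int.toChars num
  let head := PySem.List.slice s none (some 3)          -- s[:3]
  let tail := PySem.List.slice s (some 3) none          -- s[3:]
  let chunks := (PySem.List.pyRange 0 (PySem.List.len tail) 4).map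
    (fun i => PySem.List.slice tail (some i) (some (i + 4)))   -- [tail[i:i+4] for i in range(0, len(tail), 4)]
  String.mk (PySem.Chars.join [' '] (head :: chunks))   -- " ".join([head] + chunks)

-- ===== PRECONDITION & SPEC =====
def Spec_numWithSpaces (num : Int) (out : String) : Prop := out = numWithSpaces_alt num
instance (num : Int) (out : String) : Decidable (Spec_numWithSpaces num out) := by unfold Spec_numWithSpaces; infer_instance

-- ===== CLAIM (what is proved, stated in full; the proofs are below) =====
def Claim_equal_numWithSpaces : Prop := ∀ (num : Int), Dom_numWithSpaces num → Spec_numWithSpaces num (numWithSpaces num)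

-- ===== LEMMAS AND PROOFS =====

-- A's loop as structural recursion: the char list with a space inserted whenever the counter hits 3
def goA : List Char → Int → List Char
  | [], _ => []
  | c :: t, k => if k == 3 then ' ' :: c :: goA t 0 else c :: goA t (k + 1)

-- A's fold step, named
def stepA (acc : List Char × Int) (c : Char) : List Char × Int :=
  let acc' := if acc.2 == 3 then (acc.1 ++ [' '], 0) else (acc.1, acc.2 + 1)
  (acc'.1 ++ [c], acc'.2)

theorem foldl_stepA (cs : List Char) : ∀ (out : List Char) (k : Int),
    (cs.foldl stepA (out, k)).1 = out ++ goA cs k := by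
  induction cs with
  | nil => intro out k; simp [goA]
  | cons c t ih =>
    intro out k
    simp only [List.foldl_cons, stepA, goA]
    by_cases h : k == 3 <;> simp [h, ih]

-- B's chunking as structural recursion
def chunks4 (l : List Char) : List (List Char) :=
  if h : l = [] then [] else l.take 4 :: chunks4 (l.drop 4)
  termination_by l.length
  decreasing_by
    cases l with
    | nil => exact absurd rfl h
    | cons a t => simp [List.length_drop]

theorem join_cons_head (sep : List Char) (c : Char) (x : List Char) (l : List (List Char)) :
    PySem.Chars.join sep ((c :: x) :: l) = c :: PySem.Chars.join sep (x :: l) := by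
  cases l with
  | nil => simp [PySem.Chars.join_singleton]
  | cons q r => simp [PySem.Chars.join_cons_cons]

-- goA = the chunked join, for any counter 0 ≤ k ≤ 3
theorem goA_eq_join (cs : List Char) : ∀ (k : Int), 0 ≤ k → k ≤ 3 →
    goA cs k = PySem.Chars.join [' ']
      (cs.take (3 - k).toNat :: chunks4 (cs.drop (3 - k).toNat)) := by
  induction cs with
  | nil =>
    intro k _ _
    simp [goA, chunks4, PySem.Chars.join_singleton]
  | cons c t ih =>
    intro k hk0 hk3
    by_cases h : k = 3
    · subst h
      have h4 : chunks4 (c :: t) = (c :: t).take 4 :: chunks4 ((c :: t).drop 4) := by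
        rw [chunks4]; simp
      simp only [goA, beq_self_eq_true, if_pos, sub_self, Int.toNat_zero,
        List.take_zero, List.drop_zero, h4]
      rw [ih 0 le_rfl (by norm_num)]
      rw [PySem.Chars.join_cons_cons]
      have : (c :: t).take 4 = c :: t.take 3 := by rfl
      rw [this, join_cons_head]
      simp
    · have hlt : k < 3 := lt_of_le_of_ne hk3 h
      have hne : (k == 3) = false := by simp [h]
      simp only [goA, hne, if_neg, Bool.false_eq_true, not_false_iff]
      rw [ih (k + 1) (by omega) (by omega)]
      have h1 : (3 - k).toNat = (3 - (k + 1)).toNat + 1 := by omega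
      rw [h1]
      simp only [List.take_succ_cons, List.drop_succ_cons]
      rw [join_cons_head]

-- cons step for pyRange with step 4
theorem pyRange_four_cons (a b : Int) (h : a < b) :
    PySem.List.pyRange a b 4 = a :: PySem.List.pyRange (a + 4) b 4 := by
  rw [PySem.List.pyRange_of_pos a b (by norm_num),
      PySem.List.pyRange_of_pos (a + 4) b (by norm_num)]
  have hm : (if a < b then ((b - a + 4 - 1) / 4).toNat else 0)
      = (if a + 4 < b then ((b - (a + 4) + 4 - 1) / 4).toNat else 0) + 1 := by
    split <;> split <;> omega
  rw [hm, List.range_succ_eq_map]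
  simp only [List.map_cons, List.map_map]
  congr 1
  · ring
  · apply List.map_congr_left; intro k _; simp [Function.comp]; ring

-- B's comprehension equals the recursive chunking
theorem map_slice_eq_chunks4 (t : List Char) :
    (PySem.List.pyRange 0 (PySem.List.len t) 4).map
      (fun i => PySem.List.slice t (some i) (some (i + 4))) = chunks4 t := by
  induction hn : t.length using Nat.strong_induction_on generalizing t with
  | _ n ih =>
  simp only [PySem.List.len_eq]
  cases t with
  | nil =>
    rw [chunks4]
    rw [show ((([]:List Char).length : Int)) = 0 from rfl]
    rw [PySem.List.pyRange_of_pos 0 0 (by norm_num)]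
    simp
  | cons c r =>
    have hlen : (0:Int) < ((c :: r).length : Int) := by simp
    rw [pyRange_four_cons 0 _ hlen]
    rw [chunks4]
    simp only [List.map_cons, reduceDIte, List.cons.injEq, reduceCtorEq]
    constructor
    · rw [PySem.List.slice_toNat _ le_rfl (by norm_num)]
      rfl
    · -- reindex: pyRange 4 len 4 ↦ pyRange 0 (len-4) 4 shifted
      have hshift : PySem.List.pyRange (0 + 4) (((c :: r).length : Int)) 4
          = (PySem.List.pyRange 0 (((c :: r).length : Int) - 4) 4).map (· + 4) := by
        rw [PySem.List.pyRange_of_pos _ _ (show (0:Int) < 4 by norm_num),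
            PySem.List.pyRange_of_pos _ _ (show (0:Int) < 4 by norm_num), List.map_map]
        have : (if (0:Int) + 4 < (((c :: r).length : Int))
            then (((((c :: r).length : Int)) - (0 + 4) + 4 - 1) / 4).toNat else 0)
            = (if (0:Int) < (((c :: r).length : Int)) - 4
            then (((((c :: r).length : Int)) - 4 - 0 + 4 - 1) / 4).toNat else 0) := by
          split <;> split <;> omega
        rw [this]
        apply List.map_congr_left; intro k _; simp [Function.comp]; ring
      rw [hshift, List.map_map]
      have hn' : r.length + 1 = n := by simpa using hn
      have hrec := ih ((c :: r).drop 4).length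
        (by simp only [List.length_drop, List.length_cons]; omega) ((c :: r).drop 4) rfl
      simp only [PySem.List.len_eq] at hrec
      rw [← hrec]
      by_cases h4 : 4 ≤ (c :: r).length
      · have h4' : ((((c :: r).drop 4).length : Int)) = (((c :: r).length : Int)) - 4 := by
          simp [List.length_drop]; omega
        rw [h4']
        apply List.map_congr_left
        intro i hi
        obtain ⟨hi0, hiu, -⟩ :=
          (PySem.List.mem_pyRange_iff_of_pos (show (0:Int) < 4 by norm_num) i).mp hi
        simp only [Function.comp]
        rw [PySem.List.slice_toNat (c :: r) (show (0:Int) ≤ i + 4 by omega)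
              (show (0:Int) ≤ i + 4 + 4 by omega),
            PySem.List.slice_toNat ((c :: r).drop 4) hi0 (show (0:Int) ≤ i + 4 by omega)]
        rw [List.drop_drop]
        rw [show (i + 4 + 4).toNat = i.toNat + 8 by omega,
            show (i + 4).toNat = 4 + i.toNat by omega]
        congr 1
        omega
      · have hd : (c :: r).drop 4 = [] := List.drop_eq_nil_of_le (by omega)
        rw [hd]
        have h0 : PySem.List.pyRange 0 ((((c :: r).length : Int)) - 4) 4 = [] := by
          rw [PySem.List.pyRange_of_pos _ _ (show (0:Int) < 4 by norm_num)]
          simp only [List.map_eq_nil_iff, List.range_eq_nil]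
          split
          · omega
          · rfl
        have h0' : PySem.List.pyRange 0 ((([]:List Char).length : Int)) 4 = [] := by
          rw [show ((([]:List Char).length : Int)) = 0 from rfl]
          rw [PySem.List.pyRange_of_pos 0 0 (by norm_num)]
          simp
        rw [h0, h0']
        simp

theorem goA_zero_cons (c : Char) (t : List Char) : goA (c :: t) 0 = c :: goA t 1 := by
  simp [goA]

-- goA never returns [] on a nonempty list
theorem goA_ne_nil (cs : List Char) (h : cs ≠ []) (k : Int) : goA cs k ≠ [] := by
  cases cs with
  | nil => exact absurd rfl h
  | cons c t => simp only [goA]; split <;> simp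

-- goA preserves the last element
theorem getLast?_cons_ne_nil {c : Char} {l : List Char} (h : l ≠ []) :
    (c :: l).getLast? = l.getLast? := by
  cases l with
  | nil => exact absurd rfl h
  | cons d u => exact List.getLast?_cons_cons

theorem goA_getLast? (cs : List Char) : ∀ (k : Int), cs ≠ [] →
    (goA cs k).getLast? = cs.getLast? := by
  induction cs with
  | nil => intro k h; exact absurd rfl h
  | cons c t ih =>
    intro k _
    cases ht : t with
    | nil => simp only [goA]; split <;> simp
    | cons d u =>
      have htne : t ≠ [] := by rw [ht]; simp
      have h1 : (goA t 0).getLast? = t.getLast? := ih 0 htne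
      have h2 : (goA t (k + 1)).getLast? = t.getLast? := ih (k + 1) htne
      rw [← ht]
      simp only [goA]
      split
      · rw [getLast?_cons_ne_nil (by simp),
            getLast?_cons_ne_nil (goA_ne_nil t htne 0), h1,
            getLast?_cons_ne_nil htne]
      · rw [getLast?_cons_ne_nil (goA_ne_nil t htne (k + 1)), h2,
            getLast?_cons_ne_nil htne]

-- strip is the identity when first and last characters are not whitespace
theorem strip_id_of_ends (cs : List Char)
    (h1 : ∀ a, cs.head? = some a → PySem.Chars.isspace a = false)
    (h2 : ∀ b, cs.getLast? = some b → PySem.Chars.isspace b = false) :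
    PySem.Chars.strip cs = cs := by
  cases cs with
  | nil => rfl
  | cons c t =>
    have hc : PySem.Chars.isspace c = false := h1 c rfl
    have hl : PySem.Chars.lstrip (c :: t) = c :: t := by
      simp [PySem.Chars.lstrip, hc]
    have hlast : ∃ b, (c :: t).getLast? = some b := by
      cases hb : (c :: t).getLast? with
      | none => simp at hb
      | some b => exact ⟨b, rfl⟩
    obtain ⟨b, hb⟩ := hlast
    have hbs : PySem.Chars.isspace b = false := h2 b hb
    have hrev : (c :: t).reverse.head? = some b := by
      rw [List.head?_reverse]; exact hb
    have hr : PySem.Chars.rstrip (c :: t) = c :: t := by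
      unfold PySem.Chars.rstrip
      cases hrv : (c :: t).reverse with
      | nil => simp at hrv
      | cons x xs =>
        rw [hrv] at hrev
        simp only [List.head?_cons, Option.some.injEq] at hrev
        subst hrev
        rw [List.dropWhile_cons]
        simp only [hbs, Bool.false_eq_true, if_neg, not_false_iff]
        rw [← hrv, List.reverse_reverse]
    unfold PySem.Chars.strip
    rw [hl, hr]

-- every character of Nat.toDigits 10 m is a (non-space) digit character
theorem toDigitsCore_nonspace (fuel : Nat) : ∀ (n : Nat) (ds : List Char),
    (∀ c ∈ ds, PySem.Chars.isspace c = false) →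
    ∀ c ∈ Nat.toDigitsCore 10 fuel n ds, PySem.Chars.isspace c = false := by
  induction fuel with
  | zero => intro n ds hds; simpa [Nat.toDigitsCore] using hds
  | succ f ih =>
    intro n ds hds c hc
    have hdigit : PySem.Chars.isspace (Nat.digitChar (n % 10)) = false := by
      have h10 : n % 10 < 10 := Nat.mod_lt _ (by norm_num)
      generalize n % 10 = m at h10 ⊢
      interval_cases m <;> decide
    simp only [Nat.toDigitsCore] at hc
    split at hc
    · rcases List.mem_cons.mp hc with h | h
      · subst h; exact hdigit
      · exact hds c h
    · refine ih (n / 10) (Nat.digitChar (n % 10) :: ds) ?_ c hc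
      intro d hd
      rcases List.mem_cons.mp hd with h | h
      · subst h; exact hdigit
      · exact hds d h

theorem toDigits_nonspace (m : Nat) :
    ∀ c ∈ Nat.toDigits 10 m, PySem.Chars.isspace c = false := by
  intro c hc
  exact toDigitsCore_nonspace (m + 1) m [] (by simp) c hc

-- every character of str(num) is non-space
theorem toChars_nonspace (num : Int) :
    ∀ c ∈ PySem.Int.toChars num, PySem.Chars.isspace c = false := by
  intro c hc
  unfold PySem.Int.toChars at hc
  split at hc
  · rcases List.mem_cons.mp hc with h | h
    · subst h; decide
    · exact toDigits_nonspace _ c h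
  · exact toDigits_nonspace _ c hc

-- ===== VERDICT (by name: the statement is the Claim_ definition above) =====
theorem numWithSpaces_spec : Claim_equal_numWithSpaces := by
  intro num _
  unfold Spec_numWithSpaces
  have hns := toChars_nonspace num
  have hA : numWithSpaces num
      = String.mk (PySem.Chars.strip (goA (PySem.Int.toChars num) 0)) := by
    show String.mk (PySem.Chars.strip
      ((PySem.List.pyRange 0 (PySem.List.len (PySem.Int.toChars num)) 1).foldl
        (fun (acc : List Char × Int) i =>
          stepA acc (PySem.List.pyGetD (PySem.Int.toChars num) i ' ')) ([], 0)).1) = _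
    rw [PySem.List.foldl_pyRange_zero_pyGetD (PySem.Int.toChars num) ' ' stepA ([], 0)]
    rw [show ((PySem.Int.toChars num).foldl stepA ([], 0)).1 = goA (PySem.Int.toChars num) 0
      from by simpa using foldl_stepA (PySem.Int.toChars num) [] 0]
  have hB : numWithSpaces_alt num
      = String.mk (PySem.Chars.join [' ']
          ((PySem.Int.toChars num).take 3 :: chunks4 ((PySem.Int.toChars num).drop 3))) := by
    show String.mk (PySem.Chars.join [' ']
      (PySem.List.slice (PySem.Int.toChars num) none (some 3) ::
        (PySem.List.pyRange 0 (PySem.List.len (PySem.List.slice (PySem.Int.toChars num) (some 3) none)) 4).map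
          (fun i => PySem.List.slice (PySem.List.slice (PySem.Int.toChars num) (some 3) none)
            (some i) (some (i + 4))))) = _
    rw [map_slice_eq_chunks4, PySem.List.slice_to _ (by norm_num),
        PySem.List.slice_from _ (by norm_num)]
    rw [show Int.toNat 3 = 3 from rfl]
  rw [hA, hB]
  -- strip is the identity: the result starts with cs.head and ends with cs.getLast, both non-space
  have hstrip : PySem.Chars.strip (goA (PySem.Int.toChars num) 0)
      = goA (PySem.Int.toChars num) 0 := by
    apply strip_id_of_ends
    · intro a ha
      cases hc : PySem.Int.toChars num with
      | nil => rw [hc] at ha; simp [goA] at ha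
      | cons c t =>
        rw [hc, goA_zero_cons] at ha
        simp only [List.head?_cons, Option.some.injEq] at ha
        subst ha
        exact hns _ (by rw [hc]; simp)
    · intro b hb
      cases hc : PySem.Int.toChars num with
      | nil => rw [hc] at hb; simp [goA] at hb
      | cons c t =>
        rw [hc] at hb
        rw [goA_getLast? (c :: t) 0 (by simp)] at hb
        exact hns b (by rw [hc]; exact List.mem_of_getLast? hb)
  rw [hstrip]
  rw [goA_eq_join (PySem.Int.toChars num) 0 le_rfl (by norm_num)]
  rw [show ((3:Int) - 0).toNat = 3 from rfl]
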